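-- pv_equiv track=rewrite | github.com/sivcovvladimir-cyber/aivideo | scripts/previews_from_pixverse_html_dump.py | pick_best_image
-- ===== SOURCE A (Python) =====
-- from typing import Iterable
--
-- RASTER_EXT = (".png", ".jpg", ".jpeg", ".webp")
--
-- def strip_query(url: str) -> str:
--     return url.split("?", 1)[0]
--
-- def first_raster_url(imgs: Iterable[str]) -> str | None:
--     for u in imgs:
--         low = u.lower()
--         if any(low.split("?", 1)[0].endswith(ext) for ext in RASTER_EXT):
--             return u
--     return None
--
-- def pick_best_image(imgs: list[str]) -> str | None:
--     u = first_raster_url(imgs)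
--     if not u:
--         return None
--     stripped = [strip_query(x) for x in imgs]
--     for pref in (".png", ".jpg", ".jpeg"):
--         for x in stripped:
--             if x.lower().endswith(pref):
--                 return x
--     return strip_query(u)
-- ===== SOURCE B (Python) =====
-- RASTER_EXT = (".png", ".jpg", ".jpeg", ".webp")
--
-- _RANK = {".png": 0, ".jpg": 1, ".jpeg": 2, ".webp": 3}
--
--
-- def strip_query(url: str) -> str:
--     return url.split("?", 1)[0]
--
--
-- def pick_best_image(imgs: list[str]) -> str | None:
--     best = None
--     best_rank = 4
--     for u in imgs:
--         s = strip_query(u)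
--         low = s.lower()
--         r = 4
--         for ext, k in _RANK.items():
--             if low.endswith(ext):
--                 r = k
--                 break
--         if r < best_rank:
--             best, best_rank = s, r
--     return best
-- ===== Notes on version B (the rewrite author's own statement) =====
-- stated objective: simpler
-- what changed: Replaces the find-first-raster pass plus up to three full re-scans of the stripped list by a single pass that ranks each url with an extension-priority table and keeps the first url of the strictly smallest rank.
import Mathlib
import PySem

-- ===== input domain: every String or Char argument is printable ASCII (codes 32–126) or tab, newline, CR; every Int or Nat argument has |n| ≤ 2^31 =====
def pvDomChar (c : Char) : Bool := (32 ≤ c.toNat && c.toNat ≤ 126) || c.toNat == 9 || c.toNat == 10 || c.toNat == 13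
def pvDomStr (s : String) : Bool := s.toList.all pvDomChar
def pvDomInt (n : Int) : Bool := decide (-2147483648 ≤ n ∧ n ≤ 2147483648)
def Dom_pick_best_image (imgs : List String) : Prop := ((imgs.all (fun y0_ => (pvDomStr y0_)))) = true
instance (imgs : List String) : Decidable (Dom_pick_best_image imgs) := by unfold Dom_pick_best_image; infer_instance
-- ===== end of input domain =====

-- B replaces A's find-first-raster pass plus up to three further full scans of the stripped
-- list by a single pass keeping the first url of the strictly smallest extension-table rank
-- (objective: simpler).

-- ===== PORT A =====
def RASTER_EXT : List String := [".png", ".jpg", ".jpeg", ".webp"]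

-- url.split("?", 1)[0]  (the split list is never empty, and "?" ≠ "" so splitMax? never fails)
def strip_query (url : String) : String :=
  match PySem.Str.splitMax? url "?" 1 with
  | some parts => parts.headD ""
  | none => ""

def first_raster_url (imgs : List String) : Option String :=
  match imgs with
  | [] => none
  | u :: rest =>
    let low := PySem.Str.lower u
    if RASTER_EXT.any (fun ext => PySem.Str.endswith (strip_query low) ext) then some u
    else first_raster_url rest

-- the nested 'for pref … : for x in stripped … : return x' loops of pick_best_image
def pickPrefLoop (prefs : List String) (stripped : List String) (u : String) : String :=
  match prefs with
  | [] => strip_query u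
  | p :: ps =>
    match stripped.find? (fun x => PySem.Str.endswith (PySem.Str.lower x) p) with
    | some x => x
    | none => pickPrefLoop ps stripped u

def pick_best_image (imgs : List String) : Option String :=
  match first_raster_url imgs with
  | none => none
  | some u =>
    if u = "" then none   -- Python's 'if not u' is also true for the empty string
    else some (pickPrefLoop [".png", ".jpg", ".jpeg"] (imgs.map strip_query) u)

-- ===== PORT B =====
def RANKS : List (String × Int) := [(".png", 0), (".jpg", 1), (".jpeg", 2), (".webp", 3)]

-- the inner 'for ext, k in _RANK.items(): … break' loop
def rank_of (low : String) : Int :=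
  match RANKS.find? (fun p => PySem.Str.endswith low p.1) with
  | some p => p.2
  | none => 4

def bstep (st : Option String × Int) (u : String) : Option String × Int :=
  let s := strip_query u
  let r := rank_of (PySem.Str.lower s)
  if r < st.2 then (some s, r) else st

def pick_best_image_alt (imgs : List String) : Option String :=
  (imgs.foldl bstep ((none : Option String), (4 : Int))).1

-- ===== PRECONDITION & SPEC =====
def Spec_pick_best_image (imgs : List String) (out : Option String) : Prop := out = pick_best_image_alt imgs
instance (imgs : List String) (out : Option String) : Decidable (Spec_pick_best_image imgs out) := by unfold Spec_pick_best_image; infer_instance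

-- ===== CLAIM (what is proved, stated in full; the proofs are below) =====
def Claim_equal_pick_best_image : Prop := ∀ (imgs : List String), Dom_pick_best_image imgs → Spec_pick_best_image imgs (pick_best_image imgs)

-- ===== LEMMAS AND PROOFS =====

-- the rank B assigns to a url
def rnk (u : String) : Int := rank_of (PySem.Str.lower (strip_query u))

-- running minimum of the ranks of a list, seeded with k
def minr (l : List String) (k : Int) : Int := l.foldl (fun m u => min m (rnk u)) k

lemma go_msplit_zero (fuel : Nat) (l cur : List Char) (acc : List (List Char)) :
    PySem.Chars.splitOnMax.go ['?'] fuel 0 l cur acc = ((cur.reverse ++ l) :: acc).reverse := by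
  cases fuel with
  | zero => rfl
  | succ f => cases l with
    | nil => simp [PySem.Chars.splitOnMax.go]
    | cons c rest => simp [PySem.Chars.splitOnMax.go]

lemma headD_splitOnMax_go (fuel : Nat) (cs cur : List Char) (acc : List (List Char)) :
    cs.length < fuel →
    PySem.Chars.splitOnMax.go ['?'] fuel 1 cs cur acc =
      if '?' ∈ cs then
        ((cs.dropWhile (fun c => !(c == '?'))).tail ::
          (cur.reverse ++ cs.takeWhile (fun c => !(c == '?'))) :: acc).reverse
      else ((cur.reverse ++ cs) :: acc).reverse := by
  induction fuel generalizing cs cur acc with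
  | zero => intro h; omega
  | succ f ih =>
    intro h
    cases cs with
    | nil => simp [PySem.Chars.splitOnMax.go]
    | cons c rest =>
      by_cases hc : c = '?'
      · subst hc
        simp [PySem.Chars.splitOnMax.go, List.isPrefixOf, go_msplit_zero]
      · have hpre : List.isPrefixOf ['?'] (c :: rest) = false := by
          simp [List.isPrefixOf, Ne.symm hc]
        simp only [PySem.Chars.splitOnMax.go, hpre]
        rw [ih rest (c :: cur) acc (by simpa using Nat.lt_of_succ_lt_succ h)]
        simp [hc, Ne.symm hc]

lemma strip_toList (s : String) :
    (strip_query s).toList = s.toList.takeWhile (fun c => !(c == '?')) := by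
  unfold strip_query
  simp only [PySem.Str.splitMax?, PySem.Chars.splitMax?, PySem.Chars.splitOnMax,
    show "?".toList = ['?'] from rfl]
  norm_num
  rw [headD_splitOnMax_go _ _ _ _ (by simp)]
  by_cases h : '?' ∈ s.toList
  · simp [h]
  · have ht : List.takeWhile (fun c => !(c == '?')) s.toList = s.toList := by
      rw [List.takeWhile_eq_self_iff]
      intro c hc
      simpa using ne_of_mem_of_not_mem hc h
    simp [h, ht]

lemma toNat_ofNat_valid (n : Nat) (h : n.isValidChar) : (Char.ofNat n).toNat = n := by
  unfold Char.ofNat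
  rw [dif_pos h]
  unfold Char.ofNatAux Char.toNat
  simp [UInt32.toNat_ofNatLT]

lemma lowerChar_ne_qmark (c : Char) :
    (!(PySem.Chars.lowerChar c == '?')) = (!(c == '?')) := by
  unfold PySem.Chars.lowerChar
  split
  · next h =>
    unfold PySem.Chars.isupper at h
    simp only [Bool.and_eq_true, decide_eq_true_eq, Char.le_def] at h
    have hv : ('A').toNat = 65 ∧ ('Z').toNat = 90 ∧ ('?').toNat = 63 := by decide
    have hA : ('A').toNat ≤ c.toNat := h.1
    have hZ : c.toNat ≤ ('Z').toNat := h.2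
    have h1 : c ≠ '?' := by
      intro he; subst he
      omega
    have h2 : Char.ofNat (c.toNat + 32) ≠ '?' := by
      intro he
      have h3 : (Char.ofNat (c.toNat + 32)).toNat = ('?').toNat := by rw [he]
      rw [toNat_ofNat_valid _ (by left; omega)] at h3
      omega
    simp [h1, h2]
  · rfl

lemma strip_lower (u : String) :
    strip_query (PySem.Str.lower u) = PySem.Str.lower (strip_query u) := by
  rw [← String.toList_inj, strip_toList, PySem.Str.toList_lower, PySem.Str.toList_lower,
    strip_toList]
  simp only [PySem.Chars.lower, List.takeWhile_map]
  rw [show ((fun c => !(c == '?')) ∘ PySem.Chars.lowerChar) = (fun c => !(c == '?')) from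
    funext lowerChar_ne_qmark]

lemma rank_of_eq (s : String) :
    rank_of s =
      if PySem.Str.endswith s ".png" then 0
      else if PySem.Str.endswith s ".jpg" then 1
      else if PySem.Str.endswith s ".jpeg" then 2
      else if PySem.Str.endswith s ".webp" then 3
      else 4 := by
  unfold rank_of RANKS
  cases h1 : PySem.Str.endswith s ".png" <;>
    cases h2 : PySem.Str.endswith s ".jpg" <;>
      cases h3 : PySem.Str.endswith s ".jpeg" <;>
        cases h4 : PySem.Str.endswith s ".webp" <;>
          simp at h1 h2 h3 h4 <;>
            simp [List.find?, h1, h2, h3, h4]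

lemma rnk_nonneg (u : String) : 0 ≤ rnk u := by
  unfold rnk; rw [rank_of_eq]; split_ifs <;> norm_num

-- A's raster test on u equals "B's rank of u is below 4"
lemma pA_eq_rnk (u : String) :
    (RASTER_EXT.any fun ext => PySem.Str.endswith (strip_query (PySem.Str.lower u)) ext)
      = decide (rnk u < 4) := by
  rw [strip_lower]
  unfold rnk
  rw [rank_of_eq]
  simp only [RASTER_EXT, List.any_cons, List.any_nil]
  split_ifs with h1 h2 h3 h4 <;> simp_all

lemma ends_png_eq (v : String) :
    PySem.Str.endswith (PySem.Str.lower (strip_query v)) ".png" = decide (rnk v = 0) := by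
  unfold rnk; rw [rank_of_eq]
  split_ifs with h1 h2 h3 h4 <;> simp_all

lemma ends_jpg_eq (v : String) (h : rnk v ≠ 0) :
    PySem.Str.endswith (PySem.Str.lower (strip_query v)) ".jpg" = decide (rnk v = 1) := by
  unfold rnk at *; rw [rank_of_eq] at *
  split_ifs at * with h1 h2 h3 h4 <;> simp_all

lemma ends_jpeg_eq (v : String) (h0 : rnk v ≠ 0) (h1 : rnk v ≠ 1) :
    PySem.Str.endswith (PySem.Str.lower (strip_query v)) ".jpeg" = decide (rnk v = 2) := by
  unfold rnk at *; rw [rank_of_eq] at *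
  split_ifs at * with h1 h2 h3 h4 <;> simp_all

lemma find?_congr_mem {α : Type} (l : List α) (p q : α → Bool)
    (h : ∀ x ∈ l, p x = q x) : l.find? p = l.find? q := by
  induction l with
  | nil => rfl
  | cons a t ih =>
    simp only [List.find?_cons, h a (by simp)]
    cases q a with
    | true => rfl
    | false => exact ih fun x hx => h x (by simp [hx])

lemma minr_le_seed (l : List String) (k : Int) : minr l k ≤ k := by
  induction l generalizing k with
  | nil => simp [minr]
  | cons u t ih =>
    simp only [minr, List.foldl_cons] at *
    exact le_trans (ih (min k (rnk u))) (min_le_left _ _)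

lemma minr_le_mem (l : List String) (k : Int) (u : String) (hu : u ∈ l) : minr l k ≤ rnk u := by
  induction l generalizing k with
  | nil => cases hu
  | cons a t ih =>
    simp only [minr, List.foldl_cons] at *
    rcases List.mem_cons.1 hu with h | h
    · subst h
      exact le_trans (minr_le_seed t _) (min_le_right _ _)
    · exact ih _ h

lemma le_minr (l : List String) (k m : Int) (hk : m ≤ k) (h : ∀ v ∈ l, m ≤ rnk v) :
    m ≤ minr l k := by
  induction l generalizing k with
  | nil => simpa [minr]
  | cons a t ih =>
    simp only [minr, List.foldl_cons] at *
    exact ih _ (le_min hk (h a (by simp))) (fun v hv => h v (by simp [hv]))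

lemma minr_attained (l : List String) (k : Int) (h : minr l k < k) :
    ∃ u ∈ l, rnk u = minr l k := by
  induction l generalizing k with
  | nil => simp [minr] at h
  | cons a t ih =>
    simp only [minr, List.foldl_cons] at *
    by_cases hlt : minr t (min k (rnk a)) < min k (rnk a)
    · obtain ⟨u, hu, he⟩ := ih _ hlt
      exact ⟨u, by simp [hu], he⟩
    · rw [not_lt] at hlt
      have h2 := minr_le_seed t (min k (rnk a))
      have h3 : minr t (min k (rnk a)) = min k (rnk a) := le_antisymm h2 hlt
      have hk : min k (rnk a) < k := by
        have hh : minr t (min k (rnk a)) < k := h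
        omega
      have hm : min k (rnk a) = rnk a := by
        rcases min_cases k (rnk a) with ⟨h4, h5⟩ | ⟨h4, h5⟩ <;> omega
      refine ⟨a, by simp, ?_⟩
      show rnk a = minr t (min k (rnk a))
      omega

lemma foldB_char (l : List String) (b : Option String) (k : Int) :
    List.foldl bstep (b, k) l =
      match l.find? (fun u => decide (rnk u < k) && decide (rnk u ≤ minr l k)) with
      | some u => (some (strip_query u), minr l k)
      | none => (b, k) := by
  induction l generalizing b k with
  | nil => rfl
  | cons a t ih =>
    have hstep : bstep (b, k) a =
        if rnk a < k then (some (strip_query a), rnk a) else (b, k) := by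
      simp only [bstep, rnk]
    have hmin : minr (a :: t) k = minr t (min k (rnk a)) := by
      simp [minr]
    by_cases ha : rnk a < k
    · rw [List.foldl_cons, hstep, if_pos ha, ih]
      have hmm : min k (rnk a) = rnk a := by omega
      rw [hmin, hmm]
      by_cases hat : minr t (rnk a) < rnk a
      · -- the minimum lies strictly inside the tail
        have hne : ¬ (rnk a < k ∧ rnk a ≤ minr t (rnk a)) := by omega
        rw [List.find?_cons_of_neg (by simpa using hne)]
        have hpq : ∀ v ∈ t,
            (decide (rnk v < rnk a) && decide (rnk v ≤ minr t (rnk a)))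
              = (decide (rnk v < k) && decide (rnk v ≤ minr t (rnk a))) := by
          intro v _
          rcases le_or_gt (rnk v) (minr t (rnk a)) with hle | hgt
          · simp [hle]; omega
          · simp [show ¬ rnk v ≤ minr t (rnk a) by omega]
        rw [find?_congr_mem _ _ _ hpq]
        obtain ⟨u, hu, he⟩ := minr_attained t (rnk a) hat
        have hsome : (t.find? fun v => decide (rnk v < k) && decide (rnk v ≤ minr t (rnk a))).isSome := by
          rw [List.find?_isSome]
          exact ⟨u, hu, by simp [he]; omega⟩
        obtain ⟨x, hx⟩ := Option.isSome_iff_exists.1 hsome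
        rw [hx]
      · -- the head attains the minimum
        rw [not_lt] at hat
        have h3 : minr t (rnk a) = rnk a := le_antisymm (minr_le_seed t _) hat
        rw [h3]
        rw [List.find?_cons_of_pos (by simp; omega)]
        have hnone : t.find? (fun v => decide (rnk v < rnk a) && decide (rnk v ≤ rnk a)) = none := by
          rw [List.find?_eq_none]
          intro v hv
          have := minr_le_mem t (rnk a) v hv
          simp; omega
        rw [hnone]
    · rw [List.foldl_cons, hstep, if_neg ha, ih]
      have hmm : min k (rnk a) = k := by omega
      rw [hmin, hmm]
      rw [List.find?_cons_of_neg (by simp; omega)]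

lemma fru_eq_find? (imgs : List String) :
    first_raster_url imgs = imgs.find? (fun u => decide (rnk u < 4)) := by
  induction imgs with
  | nil => rfl
  | cons u t ih =>
    simp only [first_raster_url, List.find?, pA_eq_rnk]
    cases h : decide (rnk u < 4) <;> simp [ih]

lemma rnk_empty : rnk "" = 4 := by decide

-- ===== VERDICT (by name: the statement is the Claim_ definition above) =====
theorem pick_best_image_spec : Claim_equal_pick_best_image := by
  intro imgs _
  unfold Spec_pick_best_image pick_best_image pick_best_image_alt
  rw [foldB_char, fru_eq_find?]
  cases hf : imgs.find? (fun u => decide (rnk u < 4)) with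
  | none =>
    dsimp only
    have hall := List.find?_eq_none.1 hf
    have hnone : imgs.find? (fun u => decide (rnk u < 4) && decide (rnk u ≤ minr imgs 4)) = none := by
      rw [List.find?_eq_none]
      intro v hv
      have := hall v hv
      simp_all
    rw [hnone]
  | some u =>
    dsimp only
    have hu4 : rnk u < 4 := by simpa using List.find?_some hf
    have humem : u ∈ imgs := List.mem_of_find?_eq_some hf
    have hune : ¬ (u = "") := by
      intro he; subst he; rw [rnk_empty] at hu4; omega
    rw [if_neg hune]
    have hM0 : 0 ≤ minr imgs 4 := le_minr _ _ _ (by norm_num) (fun v _ => rnk_nonneg v)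
    have hMu : minr imgs 4 ≤ rnk u := minr_le_mem _ _ _ humem
    simp only [pickPrefLoop, List.find?_map, Function.comp_def]
    rw [show (fun x => PySem.Str.endswith (PySem.Str.lower (strip_query x)) ".png")
        = (fun x => decide (rnk x = 0)) from funext ends_png_eq]
    cases h0 : imgs.find? (fun x => decide (rnk x = 0)) with
    | some x =>
      have hx0 : rnk x = 0 := by simpa using List.find?_some h0
      have hxm : x ∈ imgs := List.mem_of_find?_eq_some h0
      have hM : minr imgs 4 = 0 := by
        have := minr_le_mem imgs 4 x hxm; omega
      have hbeq : imgs.find? (fun v => decide (rnk v < 4) && decide (rnk v ≤ minr imgs 4))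
          = imgs.find? (fun x => decide (rnk x = 0)) := by
        rw [hM]
        apply find?_congr_mem
        intro v _
        have hnn := rnk_nonneg v
        by_cases hv : rnk v = 0
        · simp [hv]
        · have hle : ¬ rnk v ≤ 0 := by omega
          simp [hv, hle]
      rw [hbeq, h0]
      simp
    | none =>
      have hall0 : ∀ v ∈ imgs, ¬ rnk v = 0 := by
        intro v hv
        simpa using List.find?_eq_none.1 h0 v hv
      rw [find?_congr_mem imgs _ (fun x => decide (rnk x = 1))
        (fun v hv => ends_jpg_eq v (hall0 v hv))]
      cases h1 : imgs.find? (fun x => decide (rnk x = 1)) with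
      | some x =>
        have hx1 : rnk x = 1 := by simpa using List.find?_some h1
        have hxm : x ∈ imgs := List.mem_of_find?_eq_some h1
        have hM : minr imgs 4 = 1 := by
          have ha := minr_le_mem imgs 4 x hxm
          have hb := le_minr imgs 4 1 (by norm_num)
            (fun v hv => by have := rnk_nonneg v; have := hall0 v hv; omega)
          omega
        have hbeq : imgs.find? (fun v => decide (rnk v < 4) && decide (rnk v ≤ minr imgs 4))
            = imgs.find? (fun x => decide (rnk x = 1)) := by
          rw [hM]
          apply find?_congr_mem
          intro v hv
          have hnn := rnk_nonneg v
          have hn0 := hall0 v hv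
          by_cases hv1 : rnk v = 1
          · simp [hv1]
          · have hle : ¬ rnk v ≤ 1 := by omega
            simp [hv1, hle]
        rw [hbeq, h1]
        simp
      | none =>
        have hall1 : ∀ v ∈ imgs, ¬ rnk v = 1 := by
          intro v hv
          simpa using List.find?_eq_none.1 h1 v hv
        rw [find?_congr_mem imgs _ (fun x => decide (rnk x = 2))
          (fun v hv => ends_jpeg_eq v (hall0 v hv) (hall1 v hv))]
        cases h2 : imgs.find? (fun x => decide (rnk x = 2)) with
        | some x =>
          have hx2 : rnk x = 2 := by simpa using List.find?_some h2
          have hxm : x ∈ imgs := List.mem_of_find?_eq_some h2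
          have hM : minr imgs 4 = 2 := by
            have ha := minr_le_mem imgs 4 x hxm
            have hb := le_minr imgs 4 2 (by norm_num)
              (fun v hv => by
                have := rnk_nonneg v; have := hall0 v hv; have := hall1 v hv; omega)
            omega
          have hbeq : imgs.find? (fun v => decide (rnk v < 4) && decide (rnk v ≤ minr imgs 4))
              = imgs.find? (fun x => decide (rnk x = 2)) := by
            rw [hM]
            apply find?_congr_mem
            intro v hv
            have hnn := rnk_nonneg v
            have hn0 := hall0 v hv
            have hn1 := hall1 v hv
            by_cases hv2 : rnk v = 2
            · simp [hv2]
            · have hle : ¬ rnk v ≤ 2 := by omega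
              simp [hv2, hle]
          rw [hbeq, h2]
          simp
        | none =>
          have hall2 : ∀ v ∈ imgs, ¬ rnk v = 2 := by
            intro v hv
            simpa using List.find?_eq_none.1 h2 v hv
          have hM : minr imgs 4 = 3 := by
            have ha := minr_le_mem imgs 4 u humem
            have hge3 : ∀ v ∈ imgs, 3 ≤ rnk v := fun v hv => by
              have := rnk_nonneg v; have := hall0 v hv; have := hall1 v hv
              have := hall2 v hv; omega
            have hb := le_minr imgs 4 3 (by norm_num) hge3
            have hu3 := hge3 u humem
            omega
          have hbeq : imgs.find? (fun v => decide (rnk v < 4) && decide (rnk v ≤ minr imgs 4))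
              = imgs.find? (fun v => decide (rnk v < 4)) := by
            rw [hM]
            apply find?_congr_mem
            intro v _
            by_cases hv4 : rnk v < 4
            · simp [hv4, show rnk v ≤ 3 by omega]
            · simp [hv4]
          rw [hbeq, hf]
          simp
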